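-- pv_equiv track=rewrite | github.com/janisrebekah/Gpay-Analytics | backend/app/services/normalizer.py | _is_merchant_payment
-- ===== SOURCE A (Python) =====
-- def _is_merchant_payment(name_lower: str, raw_lower: str) -> bool:
--     """Check for registered businesses, stores, and institutions."""
--     keywords = [
--         "bakery", "store", "supermarket", "institute", "limited", "ltd",
--         "retail", "swiggy", "zudio", "amazon", "cloud", "private limited",
--         "pvt ltd", "merchant", "shop", "technologies", "inc", "llc", ".com",
--         "sweet", "restaurant", "mart", "enterprise", "service", "app"
--     ]
--     # Word boundary checks aren't strictly required for these loud tokens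
--     return any(k in name_lower or k in raw_lower for k in keywords)
-- ===== SOURCE B (Python) =====
-- _KEYWORD_CSV = ("bakery,store,supermarket,institute,limited,ltd,"
--                 "retail,swiggy,zudio,amazon,cloud,private limited,"
--                 "pvt ltd,merchant,shop,technologies,inc,llc,.com,"
--                 "sweet,restaurant,mart,enterprise,service,app")
--
-- # index the keywords once by their first character
-- _BY_FIRST = {}
-- for _k in _KEYWORD_CSV.split(","):
--     _BY_FIRST.setdefault(_k[0], []).append(_k)
--
--
-- def _scan(s: str) -> bool:
--     # one left-to-right sweep: at each position only the keywords that
--     # start with that character are candidates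
--     for i, c in enumerate(s):
--         for k in _BY_FIRST.get(c, ()):
--             if s.startswith(k, i):
--                 return True
--     return False
--
--
-- def _is_merchant_payment(name_lower: str, raw_lower: str) -> bool:
--     """Check for registered businesses, stores, and institutions."""
--     return _scan(name_lower) or _scan(raw_lower)
-- ===== Notes on version B (the rewrite author's own statement) =====
-- stated objective: alternative
-- what changed: B replaces A's 25 independent substring-membership tests ('k in s' per keyword) with a first-character index (a dict mapping each initial character to its keywords, built once from a CSV literal) consulted during a single left-to-right sweep of each string, checking startswith only for the keywords whose first character matches the current position.
import Mathlib
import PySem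

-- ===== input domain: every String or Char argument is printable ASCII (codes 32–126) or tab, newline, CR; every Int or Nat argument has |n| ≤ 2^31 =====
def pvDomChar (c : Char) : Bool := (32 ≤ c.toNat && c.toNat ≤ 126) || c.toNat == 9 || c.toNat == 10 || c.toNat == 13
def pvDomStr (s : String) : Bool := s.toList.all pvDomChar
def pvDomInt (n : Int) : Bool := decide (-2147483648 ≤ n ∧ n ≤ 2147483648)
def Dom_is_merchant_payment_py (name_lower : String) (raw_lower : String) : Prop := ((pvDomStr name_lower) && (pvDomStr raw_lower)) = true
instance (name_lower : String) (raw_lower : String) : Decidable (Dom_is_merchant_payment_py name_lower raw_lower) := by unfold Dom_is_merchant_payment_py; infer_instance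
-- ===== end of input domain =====

-- B replaces A's 25 independent substring-membership scans with a first-character
-- index (dict: initial char -> keywords) consulted during one left-to-right sweep
-- of each string (alternative decomposition, same asymptotic cost).

-- ===== PORT A =====
-- keywords = [...]; any(k in name_lower or k in raw_lower for k in keywords)
def merchantKeywords : List String :=
  ["bakery", "store", "supermarket", "institute", "limited", "ltd",
   "retail", "swiggy", "zudio", "amazon", "cloud", "private limited",
   "pvt ltd", "merchant", "shop", "technologies", "inc", "llc", ".com",
   "sweet", "restaurant", "mart", "enterprise", "service", "app"]

def is_merchant_payment_py (name_lower : String) (raw_lower : String) : Bool :=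
  merchantKeywords.any (fun k => PySem.Str.isIn k name_lower || PySem.Str.isIn k raw_lower)

-- ===== PORT B =====
-- _KEYWORD_CSV.split(",")  (sep is nonempty, so split? is always some; getD [] unwraps)
def bKeywords : List String :=
  (PySem.Str.split? ("bakery,store,supermarket,institute,limited,ltd," ++
                     "retail,swiggy,zudio,amazon,cloud,private limited," ++
                     "pvt ltd,merchant,shop,technologies,inc,llc,.com," ++
                     "sweet,restaurant,mart,enterprise,service,app") ",").getD []

-- for _k in _KEYWORD_CSV.split(","): _BY_FIRST.setdefault(_k[0], []).append(_k)
-- (_k[0] ported as headD; every keyword is nonempty, so it is exactly _k[0])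
def bByFirst : PySem.Dict Char (List String) :=
  bKeywords.foldl (fun d k => d.modify (k.toList.headD ' ') [] (· ++ [k])) PySem.Dict.empty

-- for i, c in enumerate(s): for k in _BY_FIRST.get(c, ()): if s.startswith(k, i): return True
-- (position i corresponds to the suffix s[i:]; s.startswith(k, i) = k prefix of that suffix)
def bScan : List Char → Bool
  | [] => false
  | c :: rest =>
      (bByFirst.getD c []).any (fun k => PySem.Chars.startswith (c :: rest) k.toList)
        || bScan rest

-- return _scan(name_lower) or _scan(raw_lower)
def is_merchant_payment_py_alt (name_lower : String) (raw_lower : String) : Bool :=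
  bScan name_lower.toList || bScan raw_lower.toList

-- ===== PRECONDITION & SPEC =====
def Spec_is_merchant_payment_py (name_lower : String) (raw_lower : String) (out : Bool) : Prop := out = is_merchant_payment_py_alt name_lower raw_lower
instance (name_lower : String) (raw_lower : String) (out : Bool) : Decidable (Spec_is_merchant_payment_py name_lower raw_lower out) := by unfold Spec_is_merchant_payment_py; infer_instance

-- ===== CLAIM =====
def Claim_equal_is_merchant_payment_py : Prop := ∀ (name_lower : String) (raw_lower : String), Dom_is_merchant_payment_py name_lower raw_lower → Spec_is_merchant_payment_py name_lower raw_lower (is_merchant_payment_py name_lower raw_lower)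

-- ===== LEMMAS AND PROOFS =====

-- B's CSV literal splits into exactly A's keyword list
set_option maxRecDepth 8192 in
theorem bKeywords_eq : bKeywords = merchantKeywords := by decide

-- every keyword is nonempty
theorem merchantKeywords_ne_nil : ∀ k ∈ merchantKeywords, k.toList ≠ [] := by decide

-- the first-character index groups: its bucket at c holds exactly the keywords whose headD ' ' is c
theorem mem_byFirst (c : Char) (k : String) :
    k ∈ bByFirst.getD c [] ↔ k ∈ merchantKeywords ∧ k.toList.headD ' ' = c := by
  have h1 : bByFirst
      = (bKeywords.map (fun k => (k.toList.headD ' ', k))).foldl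
          (fun d p => d.modify p.1 [] (· ++ [p.2])) PySem.Dict.empty := by
    rw [List.foldl_map]
    rfl
  rw [h1, PySem.Dict.getD_foldl_modify_append, PySem.Dict.getD_empty, List.nil_append,
    List.filter_map, List.map_map, bKeywords_eq]
  simp only [List.mem_map, Function.comp]
  constructor
  · rintro ⟨x, hx, rfl⟩
    rw [List.mem_filter] at hx
    exact ⟨hx.1, by simpa using hx.2⟩
  · rintro ⟨hk, hc⟩
    exact ⟨k, List.mem_filter.2 ⟨hk, by simpa using hc⟩, rfl⟩

-- the sweep finds a hit iff some keyword is an infix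
theorem bScan_iff (s : List Char) :
    bScan s = true ↔ ∃ k ∈ merchantKeywords, k.toList <:+: s := by
  induction s with
  | nil =>
    rw [show bScan [] = false from rfl]
    simp only [Bool.false_eq_true, false_iff]
    rintro ⟨k, hk, hinf⟩
    exact merchantKeywords_ne_nil k hk (List.infix_nil.mp hinf)
  | cons c rest ih =>
    simp only [bScan, Bool.or_eq_true, List.any_eq_true, ih]
    constructor
    · rintro (⟨k, hk, hst⟩ | ⟨k, hk, hinf⟩)
      · exact ⟨k, ((mem_byFirst c k).1 hk).1,
          ((PySem.Chars.startswith_iff _ _).1 hst).isInfix⟩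
      · exact ⟨k, hk, hinf.trans (List.suffix_cons c rest).isInfix⟩
    · rintro ⟨k, hk, hinf⟩
      rcases List.infix_cons_iff.mp hinf with hpre | hinf'
      · left
        have hne := merchantKeywords_ne_nil k hk
        have hhead : k.toList.headD ' ' = c := by
          rcases hk' : k.toList with _ | ⟨a, t⟩
          · exact absurd hk' hne
          · rw [hk'] at hpre
            rcases hpre with ⟨u, hu⟩
            injection hu with h1 _
        exact ⟨k, (mem_byFirst c k).2 ⟨hk, hhead⟩,
          (PySem.Chars.startswith_iff _ _).2 hpre⟩
      · exact Or.inr ⟨k, hk, hinf'⟩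

-- ===== VERDICT =====
theorem is_merchant_payment_py_spec : Claim_equal_is_merchant_payment_py := by
  intro name_lower raw_lower _
  unfold Spec_is_merchant_payment_py is_merchant_payment_py is_merchant_payment_py_alt
  rw [Bool.eq_iff_iff]
  simp only [Bool.or_eq_true, List.any_eq_true, bScan_iff, PySem.Str.isIn_eq,
    PySem.Chars.isIn_iff_infix]
  constructor
  · rintro ⟨k, hk, h | h⟩
    · exact Or.inl ⟨k, hk, h⟩
    · exact Or.inr ⟨k, hk, h⟩
  · rintro (⟨k, hk, h⟩ | ⟨k, hk, h⟩)
    · exact ⟨k, hk, Or.inl h⟩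
    · exact ⟨k, hk, Or.inr h⟩
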